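-- pv_equiv track=rewrite | github.com/burd5/codewars_python | adjacent_repeated_words.py | count_adjacent_pairs
-- ===== SOURCE A (Python) =====
-- def count_adjacent_pairs(st):
--     words = st.lower().split(' ')
--     currentWord = None
--     count = 0
--     for i, word in enumerate(words):
--         if i+1 < len(words):
--             if word == words[i+1]:
--                 if word != currentWord:
--                     currentWord = word
--                     count += 1
--             else:
--                 currentWord = None
--
--     return count
-- ===== SOURCE B (Python) =====
-- def _runs(words):
--     # maximal groups of consecutive equal words
--     if not words:
--         return []
--     head = words[0]
--     i = 1
--     while i < len(words) and words[i] == head: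
--         i += 1
--     return [words[:i]] + _runs(words[i:])
--
-- def count_adjacent_pairs(st):
--     return sum(1 for run in _runs(st.lower().split(' ')) if len(run) >= 2)
-- ===== Notes on version B (the rewrite author's own statement) =====
-- stated objective: idiomatic
-- what changed: A's single stateful index pass (currentWord/count with lookahead words[i+1]) is replaced by a group-then-count decomposition: split the word list into maximal runs of consecutive equal words and count the runs of length >= 2.
import Mathlib
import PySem

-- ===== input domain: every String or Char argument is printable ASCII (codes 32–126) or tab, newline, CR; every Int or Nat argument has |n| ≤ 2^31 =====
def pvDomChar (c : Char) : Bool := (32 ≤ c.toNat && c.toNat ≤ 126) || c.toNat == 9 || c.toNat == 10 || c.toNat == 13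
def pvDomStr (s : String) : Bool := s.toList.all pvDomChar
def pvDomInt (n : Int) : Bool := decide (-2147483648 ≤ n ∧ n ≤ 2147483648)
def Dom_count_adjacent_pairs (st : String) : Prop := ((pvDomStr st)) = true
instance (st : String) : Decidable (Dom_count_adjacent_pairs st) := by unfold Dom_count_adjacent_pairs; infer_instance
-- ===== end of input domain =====

-- B replaces A's single stateful lookahead pass by a group-then-count decomposition
-- (maximal runs of consecutive equal words, count runs of length ≥ 2); same cost, more idiomatic.

-- ===== PORT A =====
-- literal transliteration of A: fold over enumerate(words) with state (currentWord, count);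
-- st.lower().split(' ') = Str.split? with sep " " (never none since the separator is nonempty)
def count_adjacent_pairs (st : String) : Int :=
  let words := (PySem.Str.split? (PySem.Str.lower st) " ").getD []
  let res := (PySem.List.enumerate words).foldl
    (fun (acc : Option String × Int) (iw : Int × String) =>
      let currentWord := acc.1
      let count := acc.2
      let i := iw.1
      let word := iw.2
      if i + 1 < (words.length : Int) then
        if PySem.List.pyGet? words (i + 1) = some word then
          if some word ≠ currentWord then (some word, count + 1)
          else (currentWord, count)
        else ((none : Option String), count)
      else acc)
    ((none : Option String), 0)
  res.2

-- ===== PORT B =====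
-- B-side helper: _runs from Source B; its inner while loop scanning the run is the
-- takeWhile/dropWhile split of the tail (exact: same scan, same boundary).
def pyRuns : List String → List (List String)
  | [] => []
  | a :: t =>
    (a :: t.takeWhile (· = a)) :: pyRuns (t.dropWhile (· = a))
termination_by l => l.length
decreasing_by
  simpa using Nat.lt_succ_of_le (List.length_dropWhile_le _ _)

def count_adjacent_pairs_alt (st : String) : Int :=
  ((pyRuns ((PySem.Str.split? (PySem.Str.lower st) " ").getD [])).filter
    (fun run => decide (2 ≤ run.length))).length

-- ===== PRECONDITION & SPEC =====
def Spec_count_adjacent_pairs (st : String) (out : Int) : Prop := out = count_adjacent_pairs_alt st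
instance (st : String) (out : Int) : Decidable (Spec_count_adjacent_pairs st out) := by unfold Spec_count_adjacent_pairs; infer_instance

-- ===== CLAIM (what is proved, stated in full; the proofs are below) =====
def Claim_equal_count_adjacent_pairs : Prop := ∀ (st : String), Dom_count_adjacent_pairs st → Spec_count_adjacent_pairs st (count_adjacent_pairs st)

-- ===== LEMMAS AND PROOFS =====

-- characterization of A's loop as a structural recursion on the word list
def gA : Option String → List String → Int
  | _, [] => 0
  | _, [_] => 0
  | cur, a :: b :: t =>
    if a = b then
      (if some a ≠ cur then 1 else 0) + gA (some a) (b :: t)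
    else gA none (b :: t)

-- B's count as an Int
def cntB (l : List String) : Int := ((pyRuns l).filter (fun run => decide (2 ≤ run.length))).length

-- the step function of A's fold, with the full word list fixed
def stepA (words : List String) (acc : Option String × Int) (iw : Int × String) : Option String × Int :=
  if iw.1 + 1 < (words.length : Int) then
    if PySem.List.pyGet? words (iw.1 + 1) = some iw.2 then
      if some iw.2 ≠ acc.1 then (some iw.2, acc.2 + 1)
      else (acc.1, acc.2)
    else ((none : Option String), acc.2)
  else acc

-- A's fold over the enumerated suffix starting at k computes gA on that suffix
lemma foldA_eq_gA (ws : List String) :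
    ∀ (l : List String) (k : Nat), ws.drop k = l → ∀ (cur : Option String) (c : Int),
      ((PySem.List.enumerate l (k : Int)).foldl (stepA ws) (cur, c)).2 = c + gA cur l := by
  intro l
  induction l with
  | nil => intro k _ cur c; simp [PySem.List.enumerate_nil, gA]
  | cons a t ih =>
    intro k hk cur c
    have hk1 : ws.drop (k + 1) = t := by
      rw [← List.tail_drop, hk]
      rfl
    have ha : ws[k]? = some a := by
      have h0 : (ws.drop k)[0]? = some a := by rw [hk]; rfl
      simpa [List.getElem?_drop] using h0
    rw [PySem.List.enumerate_cons, List.foldl_cons]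
    have hcast : ((k : Int) + 1) = ((k + 1 : Nat) : Int) := by push_cast; ring
    have hnext : PySem.List.pyGet? ws ((k : Int) + 1) = t[0]? := by
      rw [hcast, PySem.List.pyGet?_natCast, ← hk1, List.getElem?_drop]
    have hguard : ((k : Int) + 1 < (ws.length : Int)) ↔ (t ≠ []) := by
      have hklen : k < ws.length := (List.getElem?_eq_some_iff.mp ha).1
      have hlen : ws.length = k + 1 + t.length := by
        have hh := congrArg List.length hk1
        simp at hh
        omega
      constructor
      · intro h ht
        have hlt : k + 1 < ws.length := by exact_mod_cast h
        rw [ht] at hk1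
        have := List.drop_eq_nil_iff.mp hk1
        omega
      · intro ht
        have : t.length ≠ 0 := by simpa using ht
        have : k + 1 < ws.length := by omega
        exact_mod_cast this
    cases t with
    | nil =>
      simp only [stepA]
      have hng : ¬ ((k : Int) + 1 < (ws.length : Int)) := by
        intro h; exact (hguard.mp h) rfl
      rw [if_neg hng, hcast, ih (k + 1) hk1 cur c]
      simp [gA]
    | cons b t' =>
      have hg : ((k : Int) + 1 < (ws.length : Int)) := hguard.mpr (by simp)
      have hb : PySem.List.pyGet? ws ((k : Int) + 1) = some b := by rw [hnext]; rfl
      simp only [stepA, hg, if_pos, hb]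
      by_cases hab : b = a
      · subst hab
        rw [if_pos rfl]
        have hgA : gA cur (b :: b :: t') = (if some b ≠ cur then 1 else 0) + gA (some b) (b :: t') := by
          simp [gA]
        by_cases hcur : some b ≠ cur
        · rw [if_pos hcur, hcast, ih (k + 1) hk1 (some b) (c + 1), hgA, if_pos hcur]
          ring
        · rw [if_neg hcur, hcast, ih (k + 1) hk1 cur c]
          simp only [ne_eq, not_not] at hcur
          rw [← hcur]
          rw [← hcur] at hgA
          rw [hgA, if_neg (fun h => h rfl)]
          ring
      · rw [if_neg (by simpa using (fun h : b = a => hab h))]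
        rw [hcast, ih (k + 1) hk1 none c]
        simp only [gA]
        rw [if_neg (fun h : a = b => hab h.symm)]

-- the "pending run already counted" correction term
def adj (cur : Option String) : List String → Int
  | b :: b' :: _ => if b = b' ∧ cur = some b then 1 else 0
  | _ => 0

lemma gA_eq_cntB_sub (l : List String) : ∀ (cur : Option String), gA cur l = cntB l - adj cur l := by
  induction l with
  | nil => intro cur; simp [gA, cntB, pyRuns, adj]
  | cons a t ih =>
    intro cur
    cases t with
    | nil => simp [gA, cntB, pyRuns, adj]
    | cons b t' =>
      by_cases hab : a = b
      · subst hab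
        -- first run of a::a::t' is a prepended to the first run of a::t'
        have hruns : pyRuns (a :: a :: t') =
            (a :: a :: t'.takeWhile (· = a)) :: pyRuns (t'.dropWhile (· = a)) := by
          rw [pyRuns]
          simp
        have hruns' : pyRuns (a :: t') =
            (a :: t'.takeWhile (· = a)) :: pyRuns (t'.dropWhile (· = a)) := by
          rw [pyRuns]
        have hc1 : cntB (a :: a :: t') =
            1 + ((pyRuns (t'.dropWhile (· = a))).filter (fun run => decide (2 ≤ run.length))).length := by
          simp [cntB, hruns]
          omega
        have hc2 : cntB (a :: t') =
            (if 2 ≤ (a :: t'.takeWhile (· = a)).length then 1 else 0) +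
            ((pyRuns (t'.dropWhile (· = a))).filter (fun run => decide (2 ≤ run.length))).length := by
          simp [cntB, hruns', List.filter_cons]
          split_ifs <;> (simp; try omega)
        have hadj : adj (some a) (a :: t') = if 2 ≤ (a :: t'.takeWhile (· = a)).length then 1 else 0 := by
          cases t' with
          | nil => simp [adj]
          | cons x t'' =>
            by_cases hx : x = a
            · subst hx
              simp [adj]
            · have hxa : ¬ a = x := fun h => hx h.symm
              simp [adj, hx, hxa]
        rw [gA, if_pos rfl, ih (some a), hc1, hc2, hadj]
        by_cases hcur : some a ≠ cur
        · rw [if_pos hcur]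
          have hz : adj cur (a :: a :: t') = 0 := by
            have hne : cur ≠ some a := fun h => hcur h.symm
            simp [adj, hne]
          rw [hz]
          split_ifs <;> ring
        · rw [if_neg hcur]
          simp only [ne_eq, not_not] at hcur
          have ho : adj cur (a :: a :: t') = 1 := by
            simp [adj, ← hcur]
          rw [ho]
          split_ifs <;> ring
      · -- first run is [a] (length 1, not counted)
        have hba : ¬ b = a := fun h => hab h.symm
        have hruns : pyRuns (a :: b :: t') = [a] :: pyRuns (b :: t') := by
          rw [pyRuns]
          simp [hba]
        have hc : cntB (a :: b :: t') = cntB (b :: t') := by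
          simp [cntB, hruns]
        rw [gA, if_neg hab, ih none, hc]
        have h1 : adj none (b :: t') = 0 := by
          cases t' <;> simp [adj]
        have h2 : adj cur (a :: b :: t') = 0 := by
          simp only [adj]
          rw [if_neg]
          rintro ⟨h, -⟩
          exact hab h
        rw [h1, h2]

lemma adj_none (l : List String) : adj none l = 0 := by
  cases l with
  | nil => simp [adj]
  | cons a t => cases t <;> simp [adj]

-- the whole A loop on any word list equals B's run count
lemma main_count (ws : List String) :
    ((PySem.List.enumerate ws).foldl (stepA ws) ((none : Option String), 0)).2 = cntB ws := by
  have h := foldA_eq_gA ws ws 0 (by simp) none 0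
  simp only [Nat.cast_zero] at h
  rw [h, gA_eq_cntB_sub ws none, adj_none]
  ring

-- ===== VERDICT (by name: the statement is the Claim_ definition above) =====
theorem count_adjacent_pairs_spec : Claim_equal_count_adjacent_pairs := by
  intro st _
  show count_adjacent_pairs st = count_adjacent_pairs_alt st
  unfold count_adjacent_pairs count_adjacent_pairs_alt
  exact main_count ((PySem.Str.split? (PySem.Str.lower st) " ").getD [])
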